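-- pv_equiv track=rewrite | github.com/gap6033/neetcode-submissions | Data Structures & Algorithms/largest-rectangle-in-histogram/submission-0.py | right_smaller
-- ===== SOURCE A (Python) =====
-- def right_smaller(array):
--     stack = []
--     right_smaller = []
--     for i in range(len(array) - 1, -1, -1):
--         while stack and array[stack[-1]] >= array[i]:
--             stack.pop()
--         if not stack:
--             right_smaller.append(len(array) - 1)
--         else:
--             right_smaller.append(stack[-1] - 1)
--         stack.append(i)
--     return right_smaller[::-1]
-- ===== SOURCE B (Python) =====
-- def right_smaller(array):
--     # simpler brute-force: for each i, scan right for the first strictly smaller element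
--     n = len(array)
--
--     def first_smaller(i):
--         for j in range(i + 1, n):
--             if array[j] < array[i]:
--                 return j - 1
--         return n - 1
--
--     return [first_smaller(i) for i in range(n)]
-- ===== Notes on version B (the rewrite author's own statement) =====
-- stated objective: simpler
-- what changed: Replaces A's reverse-pass monotone stack with a direct brute-force scan: for each index i, scan right for the first strictly smaller element and report its index minus one (n-1 if none).
import Mathlib
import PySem

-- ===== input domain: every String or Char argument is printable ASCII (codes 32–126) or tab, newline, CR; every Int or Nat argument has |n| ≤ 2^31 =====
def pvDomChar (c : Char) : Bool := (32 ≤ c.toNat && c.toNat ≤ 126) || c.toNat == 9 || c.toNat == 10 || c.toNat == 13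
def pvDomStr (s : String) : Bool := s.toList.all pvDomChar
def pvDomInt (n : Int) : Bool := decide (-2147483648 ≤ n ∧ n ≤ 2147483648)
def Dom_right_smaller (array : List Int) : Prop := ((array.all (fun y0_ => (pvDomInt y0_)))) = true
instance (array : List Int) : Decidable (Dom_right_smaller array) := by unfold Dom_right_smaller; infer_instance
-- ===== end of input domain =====

-- B replaces A's reverse monotone-stack pass by a plain brute-force scan (for each i, find the
-- first strictly smaller element to the right): simpler, not faster.

-- ===== PORT A =====
-- the 'while stack and array[stack[-1]] >= array[i]: stack.pop()' loop; stack top at head.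
-- stack indices are always valid non-negative positions, where getD j 0 is exactly Python array[j].
def rsPop (a : List Int) (v : Int) : List Nat → List Nat
  | [] => []
  | j :: s => if v ≤ a.getD j 0 then rsPop a v s else j :: s

-- the 'for i in range(len(array)-1, -1, -1)' loop: rsLoop a k processes indices k-1, k-2, …, 0,
-- threading (stack, right_smaller) exactly as A does (appending one output per index).
def rsLoop (a : List Int) : Nat → List Nat → List Int → List Int
  | 0, _, res => res
  | k + 1, stack, res =>
    let s := rsPop a (a.getD k 0) stack
    rsLoop a k (k :: s)
      (res ++ [match s with
               | [] => (a.length : Int) - 1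
               | j :: _ => (j : Int) - 1])

def right_smaller (array : List Int) : List Int :=
  -- right_smaller[::-1]
  (PySem.List.slice? (rsLoop array array.length [] []) none none (-1)).getD []

-- ===== PORT B =====
-- first_smaller(i): scan j = i+1, …, n-1 for the first j with array[j] < array[i].
-- all indices used are valid non-negative positions, where getD j 0 is exactly Python array[j].
def rsFirst (a : List Int) (i : Nat) (j : Nat) : Int :=
  if _h : j < a.length then
    if a.getD j 0 < a.getD i 0 then (j : Int) - 1 else rsFirst a i (j + 1)
  else (a.length : Int) - 1
termination_by a.length - j

def right_smaller_alt (array : List Int) : List Int :=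
  (List.range array.length).map (fun i => rsFirst array i (i + 1))

-- ===== PRECONDITION & SPEC =====
def Spec_right_smaller (array : List Int) (out : List Int) : Prop := out = right_smaller_alt array
instance (array : List Int) (out : List Int) : Decidable (Spec_right_smaller array out) := by unfold Spec_right_smaller; infer_instance

-- ===== CLAIM (what is proved, stated in full; the proofs are below) =====
def Claim_equal_right_smaller : Prop := ∀ (array : List Int), Dom_right_smaller array → Spec_right_smaller array (right_smaller array)

-- ===== LEMMAS AND PROOFS =====

-- specification of A's stack just before index i is processed: the indices j ≥ i that are strict
-- prefix-minima of the suffix starting at i, in increasing index order (stack top at head).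
def rsCond (a : List Int) (i j : Nat) : Bool :=
  (List.range' i (j - i)).all (fun m => decide (a.getD j 0 < a.getD m 0))

def rsStack (a : List Int) (i : Nat) : List Nat :=
  (List.range' i (a.length - i)).filter (rsCond a i)

theorem rsCond_iff (a : List Int) (i j : Nat) :
    rsCond a i j = true ↔ ∀ m, i ≤ m → m < j → a.getD j 0 < a.getD m 0 := by
  simp only [rsCond, List.all_eq_true, List.mem_range'_1, decide_eq_true_eq]
  constructor
  · intro h m h1 h2; exact h m ⟨h1, by omega⟩
  · intro h m hm; exact h m hm.1 (by omega)

theorem rsStack_len (a : List Int) : rsStack a a.length = [] := by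
  simp [rsStack]

theorem mem_rsStack (a : List Int) {i j : Nat} (h : j ∈ rsStack a i) :
    i ≤ j ∧ j < a.length ∧ rsCond a i j = true := by
  simp only [rsStack, List.mem_filter, List.mem_range'_1] at h
  exact ⟨h.1.1, by omega, h.2⟩

theorem rsStack_pairwise_lt (a : List Int) (i : Nat) : (rsStack a i).Pairwise (· < ·) :=
  (List.pairwise_lt_range' (s:=i) 1).filter _

theorem rsStack_pairwise_val (a : List Int) (i : Nat) :
    (rsStack a i).Pairwise (fun j1 j2 => a.getD j2 0 < a.getD j1 0) := by
  rw [List.pairwise_iff_forall_sublist]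
  intro j1 j2 hsub
  have hlt : j1 < j2 := List.pairwise_iff_forall_sublist.mp (rsStack_pairwise_lt a i) hsub
  have h1 := mem_rsStack a (hsub.subset (show j1 ∈ [j1, j2] by simp))
  have h2 := mem_rsStack a (hsub.subset (show j2 ∈ [j1, j2] by simp))
  exact (rsCond_iff a i j2).mp h2.2.2 j1 h1.1 hlt

theorem rsPop_eq_filter (a : List Int) (v : Int) :
    ∀ l : List Nat, l.Pairwise (fun j1 j2 => a.getD j2 0 < a.getD j1 0) →
      rsPop a v l = l.filter (fun j => decide (a.getD j 0 < v)) := by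
  intro l
  induction l with
  | nil => intro _; rfl
  | cons j s ih =>
    intro hp
    rw [List.pairwise_cons] at hp
    by_cases hv : v ≤ a.getD j 0
    · rw [rsPop, if_pos hv, ih hp.2, List.filter_cons_of_neg (by simp only [decide_eq_true_eq]; omega)]
    · have hv' : a.getD j 0 < v := by omega
      rw [rsPop, if_neg (by omega), List.filter_cons_of_pos (by simp only [decide_eq_true_eq]; omega),
        List.filter_eq_self.mpr]
      intro x hx
      simp only [decide_eq_true_eq]
      exact lt_trans (hp.1 x hx) hv'

theorem rsStack_step (a : List Int) {i : Nat} (hi : i < a.length) :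
    rsStack a i = i :: (rsStack a (i + 1)).filter (fun j => decide (a.getD j 0 < a.getD i 0)) := by
  have hn : a.length - i = (a.length - (i + 1)) + 1 := by omega
  rw [rsStack, hn, List.range'_succ, List.filter_cons_of_pos (by simp [rsCond]),
    rsStack, List.filter_filter]
  congr 1
  apply List.filter_congr
  intro j hj
  have hij : i + 1 ≤ j := (List.mem_range'_1.mp hj).1
  rw [Bool.eq_iff_iff]
  simp only [Bool.and_eq_true, decide_eq_true_eq, rsCond_iff]
  constructor
  · intro h
    exact ⟨h i (le_refl i) (by omega), fun m h1 h2 => h m (by omega) h2⟩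
  · intro h m h1 h2
    rcases Nat.eq_or_lt_of_le h1 with rfl | hlt
    · exact h.1
    · exact h.2 m hlt h2

theorem rsFirst_eq (a : List Int) (i : Nat) :
    ∀ d j, d = a.length - j →
      rsFirst a i j =
        (match (List.range' j (a.length - j)).filter
            (fun m => decide (a.getD m 0 < a.getD i 0)) with
         | [] => (a.length : Int) - 1
         | m :: _ => (m : Int) - 1) := by
  intro d
  induction d with
  | zero =>
    intro j hd
    have hj : ¬ j < a.length := by omega
    rw [rsFirst, dif_neg hj]
    have : a.length - j = 0 := by omega
    rw [this]
    rfl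
  | succ d ih =>
    intro j hd
    have hj : j < a.length := by omega
    have hn : a.length - j = (a.length - (j + 1)) + 1 := by omega
    rw [rsFirst, dif_pos hj, hn, List.range'_succ]
    by_cases hv : a.getD j 0 < a.getD i 0
    · rw [if_pos hv, List.filter_cons_of_pos (by simp only [decide_eq_true_eq]; omega)]
    · rw [if_neg hv, List.filter_cons_of_neg (by simp only [decide_eq_true_eq]; omega), ih (j + 1) (by omega)]

theorem head_of_min {l : List Nat} (hp : l.Pairwise (· < ·)) {x : Nat}
    (hx : x ∈ l) (hmin : ∀ y ∈ l, x ≤ y) : ∃ t, l = x :: t := by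
  cases l with
  | nil => cases hx
  | cons y t =>
    rcases List.mem_cons.mp hx with rfl | hxt
    · exact ⟨t, rfl⟩
    · have : y < x := (List.pairwise_cons.mp hp).1 x hxt
      have : x ≤ y := hmin y (List.mem_cons_self)
      omega

-- the crux: A's stack output at index i equals B's linear scan from i+1
theorem rsOut_eq (a : List Int) {i : Nat} (hi : i < a.length) :
    (match (rsStack a (i + 1)).filter (fun j => decide (a.getD j 0 < a.getD i 0)) with
     | [] => (a.length : Int) - 1
     | j :: _ => (j : Int) - 1) = rsFirst a i (i + 1) := by
  rw [rsFirst_eq a i (a.length - (i + 1)) (i + 1) rfl]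
  set p : Nat → Bool := fun j => decide (a.getD j 0 < a.getD i 0) with hp
  set F := (rsStack a (i + 1)).filter p with hF
  set G := (List.range' (i + 1) (a.length - (i + 1))).filter p with hG
  have hFsubG : ∀ x ∈ F, x ∈ G := by
    intro x hx
    rw [hF, List.mem_filter] at hx
    have hm := mem_rsStack a hx.1
    rw [hG, List.mem_filter, List.mem_range'_1]
    exact ⟨⟨hm.1, by omega⟩, hx.2⟩
  have hGpl : G.Pairwise (· < ·) := (List.pairwise_lt_range' (s:=i+1) 1).filter _
  cases hGc : G with
  | nil =>
    have : F = [] := by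
      rw [List.eq_nil_iff_forall_not_mem]
      intro x hx
      have := hFsubG x hx
      rw [hGc] at this
      cases this
    rw [this]
  | cons j t =>
    -- j is the least index > i with a smaller value
    have hjG : j ∈ G := by rw [hGc]; exact List.mem_cons_self
    have hjr : i + 1 ≤ j ∧ j < a.length ∧ p j = true := by
      rw [hG, List.mem_filter, List.mem_range'_1] at hjG
      exact ⟨hjG.1.1, by omega, hjG.2⟩
    have hminG : ∀ y ∈ G, j ≤ y := by
      intro y hy
      rw [hGc] at hy hGpl
      rcases List.mem_cons.mp hy with rfl | hyt
      · exact le_refl _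
      · exact le_of_lt ((List.pairwise_cons.mp hGpl).1 y hyt)
    have hjF : j ∈ F := by
      rw [hF, List.mem_filter]
      refine ⟨?_, hjr.2.2⟩
      rw [rsStack, List.mem_filter, List.mem_range'_1]
      refine ⟨⟨hjr.1, by omega⟩, (rsCond_iff a (i + 1) j).mpr ?_⟩
      intro m h1 h2
      have hmG : m ∉ G := fun hm => by have := hminG m hm; omega
      have hmp : ¬ p m = true := by
        intro hpm
        exact hmG (by
          rw [hG, List.mem_filter, List.mem_range'_1]
          exact ⟨⟨h1, by omega⟩, hpm⟩)
      rw [hp, decide_eq_true_eq] at hmp hjr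
      calc a.getD j 0 < a.getD i 0 := hjr.2.2
        _ ≤ a.getD m 0 := by omega
    have hFpl : F.Pairwise (· < ·) := (rsStack_pairwise_lt a (i + 1)).filter _
    obtain ⟨t', ht'⟩ := head_of_min hFpl hjF (fun y hy => hminG y (hFsubG y hy))
    rw [ht']

theorem rsLoop_eq (a : List Int) :
    ∀ k, k ≤ a.length → ∀ res,
      rsLoop a k (rsStack a k) res =
        res ++ (List.range k).reverse.map (fun i => rsFirst a i (i + 1)) := by
  intro k
  induction k with
  | zero => intro _ res; simp [rsLoop]
  | succ k ih =>
    intro hk res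
    have hkn : k < a.length := by omega
    simp only [rsLoop]
    rw [rsPop_eq_filter a _ _ (rsStack_pairwise_val a (k + 1)),
      rsOut_eq a hkn, ← rsStack_step a hkn, ih (by omega)]
    rw [List.range_succ, List.reverse_append, List.reverse_singleton]
    simp [List.append_assoc]

-- ===== VERDICT (by name: the statement is the Claim_ definition above) =====
theorem right_smaller_spec : Claim_equal_right_smaller := by
  intro array _
  show right_smaller array = right_smaller_alt array
  rw [right_smaller, PySem.List.slice?_none_none_neg_one, Option.getD_some]
  have h0 : ([] : List Nat) = rsStack array array.length := (rsStack_len array).symm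
  rw [h0, rsLoop_eq array array.length (le_refl _) [], List.nil_append,
    ← List.map_reverse, List.reverse_reverse, right_smaller_alt]
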